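-- pv_equiv track=rewrite | github.com/alan-sorani/project_euler | utils/number_utils.py | factorize_up_to
-- ===== SOURCE A (Python) =====
-- def sieve_of_eratosthenes(num : int) -> list[int]:
--     """
--     Returns a list containing all the integers up to a given number.
--
--     Parameters
--     ----------
--     num : int
--         An integer.
--
--     Returns
--     -------
--     list[int]
--         A list of all the primes up to num.
--     """
--     result = [True] * (num + 1) #binary array corresponding to numbers from 0 to num
--     i = 2
--     while(i < num):
--         if (not result[i]):
--             i = i + 1
--             continue
--         for j in range(i**2, num+1, i):
--             result[j] = False
--         i = i + 1
--     return [i for i in range(2, num + 1) if result[i]]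
--
-- def factorize_up_to(num: int) -> dict[int,int]:
--     """
--     Returns a dictionary with keys being all the numbers up to num, and the values are the factorizations of these numbers.
--
--     Parameters
--     ----------
--     num: int
--         A positive integer.
--     Returns
--     -------
--     A dictionary where the keys are the positive integers up to num, and the values are their prime factorizations, as a list [(p_1, k_1), ..., (p_m, k_m)] where the number is the product of p_i^{k_i}.
--     """
--     primes = sieve_of_eratosthenes(num)
--     num_primes = len(primes)
--     res = dict([(x,[]) for x in range(1, num+1)])
--
--     for prime in primes:
--         # orders of divisibility for the specific prime
--         prime_orders = dict([(x, 0) for x in range(1, num+1)])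
--         i = 1
--         product = prime
--         while(product <= num):
--             order = prime_orders[i] + 1
--             prime_orders[product] = order
--             res[product] += [(prime, order)]
--             i += 1
--             product = prime * i
--
--     return res
-- ===== SOURCE B (Python) =====
-- def sieve_of_eratosthenes(num : int) -> list[int]:
--     result = [True] * (num + 1)
--     i = 2
--     while(i < num):
--         if (not result[i]):
--             i = i + 1
--             continue
--         for j in range(i**2, num+1, i):
--             result[j] = False
--         i = i + 1
--     return [i for i in range(2, num + 1) if result[i]]
--
-- def factorize_up_to(num: int) -> dict[int,int]:
--     """Transposed traversal: one pass over the numbers, factoring each against the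
--     primes list directly; no per-prime auxiliary dictionaries."""
--     primes = sieve_of_eratosthenes(num)
--     res = {}
--     for n in range(1, num + 1):
--         fac = []
--         for p in primes:
--             if n % p == 0:
--                 k = 0
--                 m = n
--                 while m % p == 0:
--                     m //= p
--                     k += 1
--                 fac.append((p, k))
--         res[n] = fac
--     return res
-- ===== Notes on version B (the rewrite author's own statement) =====
-- stated objective: faster
-- what changed: B transposes A's traversal: instead of iterating over the primes and rebuilding two full size-num dictionaries per prime (per-prime order bookkeeping), B makes one pass over the numbers 1..num and factors each directly against the primes list by repeated division, so the per-prime auxiliary dictionaries disappear.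
import Mathlib
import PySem

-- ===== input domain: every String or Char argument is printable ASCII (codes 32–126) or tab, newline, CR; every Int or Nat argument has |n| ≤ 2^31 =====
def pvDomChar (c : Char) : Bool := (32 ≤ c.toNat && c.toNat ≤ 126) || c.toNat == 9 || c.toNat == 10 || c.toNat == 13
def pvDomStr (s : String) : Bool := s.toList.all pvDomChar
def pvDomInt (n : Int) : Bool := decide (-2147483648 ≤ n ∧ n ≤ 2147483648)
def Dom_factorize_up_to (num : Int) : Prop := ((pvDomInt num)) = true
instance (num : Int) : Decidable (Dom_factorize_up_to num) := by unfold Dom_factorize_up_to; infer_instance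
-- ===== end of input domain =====

-- B transposes A's traversal: one pass over the numbers 1..num, factoring each against the
-- primes list by repeated division, instead of A's per-prime pass that rebuilds two full
-- dictionaries per prime (objective: faster by a constant factor; measured, not asymptotic).

-- ===== PORT A =====
-- while loop of sieve_of_eratosthenes ('i = 2; while i < num: ...')
def sieve_of_eratosthenes_loop (res : List Bool) (i num : Int) : List Bool :=
  if _h : i < num then
    if (PySem.List.pyGetD res i true) = false then
      -- 'if (not result[i]): i += 1; continue'  (index i is always in range here)
      sieve_of_eratosthenes_loop res (i + 1) num
    else
      -- 'for j in range(i**2, num+1, i): result[j] = False'  (every j is in range)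
      sieve_of_eratosthenes_loop
        ((PySem.List.pyRange (i ^ 2) (num + 1) i).foldl
          (fun r j => PySem.List.pySetD r j false) res) (i + 1) num
  else res
termination_by (num - i).toNat
decreasing_by all_goals omega

def sieve_of_eratosthenes (num : Int) : List Int :=
  let result := sieve_of_eratosthenes_loop (List.replicate (num + 1).toNat true) 2 num
  (PySem.List.pyRange 2 (num + 1) 1).filter (fun i => PySem.List.pyGetD result i true)

-- inner 'while product <= num' loop of A (product = prime * i; fuel only makes it total —
-- num.toNat iterations always suffice since prime ≥ 2)
def factorize_loop (prime num : Int) (po : PySem.Dict Int Int)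
    (res : PySem.Dict Int (List (Int × Int))) (i : Int) (fuel : Nat) :
    PySem.Dict Int Int × PySem.Dict Int (List (Int × Int)) :=
  match fuel with
  | 0 => (po, res)
  | fuel + 1 =>
    if prime * i ≤ num then
      let order := po.getD i 0 + 1                    -- 'order = prime_orders[i] + 1' (key i is present)
      let po' := po.insert (prime * i) order          -- 'prime_orders[product] = order'
      let res' := res.insert (prime * i)
        (res.getD (prime * i) [] ++ [(prime, order)]) -- 'res[product] += [(prime, order)]'
      factorize_loop prime num po' res' (i + 1) fuel
    else (po, res)

def factorize_up_to (num : Int) : List (Int × List (Int × Int)) :=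
  let primes := sieve_of_eratosthenes num
  let res0 : PySem.Dict Int (List (Int × Int)) :=
    PySem.Dict.ofList ((PySem.List.pyRange 1 (num + 1) 1).map (fun x => (x, [])))
  let res := primes.foldl (fun res prime =>
    let po : PySem.Dict Int Int :=
      PySem.Dict.ofList ((PySem.List.pyRange 1 (num + 1) 1).map (fun x => (x, 0)))
    (factorize_loop prime num po res 1 num.toNat).2) res0
  res.items

-- ===== PORT B =====
-- inner 'while m % p == 0: m //= p; k += 1' of B (fuel only makes it total; m.toNat suffices)
def factorize_count_loop (p m k : Int) (fuel : Nat) : Int × Int :=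
  match fuel with
  | 0 => (m, k)
  | fuel + 1 =>
    if PySem.Int.mod m p = 0 then
      factorize_count_loop p (PySem.Int.floordiv m p) (k + 1) fuel
    else (m, k)

def factorize_up_to_alt (num : Int) : List (Int × List (Int × Int)) :=
  let primes := sieve_of_eratosthenes num
  let res := (PySem.List.pyRange 1 (num + 1) 1).foldl (fun d n =>
    let fac := primes.foldl (fun fac p =>
      if PySem.Int.mod n p = 0 then
        fac ++ [(p, (factorize_count_loop p n 0 n.toNat).2)]
      else fac) ([] : List (Int × Int))
    d.insert n fac) PySem.Dict.empty
  res.items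

-- ===== PRECONDITION & SPEC =====
def Spec_factorize_up_to (num : Int) (out : List (Int × List (Int × Int))) : Prop := out = factorize_up_to_alt num
instance (num : Int) (out : List (Int × List (Int × Int))) : Decidable (Spec_factorize_up_to num out) := by unfold Spec_factorize_up_to; infer_instance

-- ===== CLAIM (what is proved, stated in full; the proofs are below) =====
def Claim_equal_factorize_up_to : Prop := ∀ (num : Int), Dom_factorize_up_to num → Spec_factorize_up_to num (factorize_up_to num)

-- ===== LEMMAS AND PROOFS =====

-- exponent of p in m (the common value both loops compute); proof-only reference function
def pexp (p m : Int) : Int :=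
  if h : 2 ≤ p ∧ 1 ≤ m ∧ p ∣ m then pexp p (m / p) + 1 else 0
termination_by m.toNat
decreasing_by
  have _h1 : 0 ≤ m / p := Int.ediv_nonneg (by omega) (by omega)
  have h2 : m / p < m := Int.ediv_lt_of_lt_mul (by omega) (by nlinarith)
  omega

theorem pexp_of_not_dvd (p m : Int) (h : ¬ p ∣ m) : pexp p m = 0 := by
  rw [pexp]; rw [dif_neg]; tauto

theorem pexp_mul_self (p i : Int) (hp : 2 ≤ p) (hi : 1 ≤ i) :
    pexp p (p * i) = pexp p i + 1 := by
  rw [pexp, dif_pos ⟨hp, by nlinarith, Dvd.intro i rfl⟩,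
    Int.mul_ediv_cancel_left _ (by omega)]

theorem count_loop_snd (p : Int) (hp : 2 ≤ p) :
    ∀ (fuel : Nat) (m k : Int), 1 ≤ m → m.toNat ≤ fuel →
      (factorize_count_loop p m k fuel).2 = k + pexp p m := by
  intro fuel
  induction fuel with
  | zero => intro m k hm hf; omega
  | succ fuel ih =>
    intro m k hm hf
    by_cases hd : p ∣ m
    · have hmod : PySem.Int.mod m p = 0 := (PySem.Int.mod_eq_zero_iff_dvd m p).mpr hd
      have hpm : p ≤ m := Int.le_of_dvd (by omega) hd
      have h1 : 1 ≤ m / p := by rw [Int.le_ediv_iff_mul_le (by omega)]; omega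
      have hlt : m / p < m := Int.ediv_lt_of_lt_mul (by omega) (by nlinarith)
      have h0 : 0 ≤ m / p := Int.ediv_nonneg (by omega) (by omega)
      show (if PySem.Int.mod m p = 0 then
          factorize_count_loop p (PySem.Int.floordiv m p) (k + 1) fuel else (m, k)).2
        = k + pexp p m
      rw [if_pos hmod, PySem.Int.floordiv_eq_ediv_of_pos (by omega : (0:Int) < p)]
      rw [pexp, dif_pos ⟨hp, hm, hd⟩]
      rw [ih (m / p) (k + 1) h1 (by omega)]; ring
    · have hmod : ¬ PySem.Int.mod m p = 0 :=
        fun h => hd ((PySem.Int.mod_eq_zero_iff_dvd m p).mp h)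
      show (if PySem.Int.mod m p = 0 then
          factorize_count_loop p (PySem.Int.floordiv m p) (k + 1) fuel else (m, k)).2
        = k + pexp p m
      rw [if_neg hmod, pexp_of_not_dvd p m hd, add_zero]

theorem tab_keys {V : Type} (num : Int) (d : PySem.Dict Int V) (f : Int → V)
    (h : d.items = (PySem.List.pyRange 1 (num + 1) 1).map (fun m => (m, f m))) :
    d.keys = PySem.List.pyRange 1 (num + 1) 1 := by
  simp only [PySem.Dict.keys, h, List.map_map]
  simp [Function.comp_def]

theorem tab_getD {V : Type} (num : Int) (d : PySem.Dict Int V) (f : Int → V)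
    (h : d.items = (PySem.List.pyRange 1 (num + 1) 1).map (fun m => (m, f m)))
    (k : Int) (hk1 : 1 ≤ k) (hk2 : k < num + 1) (d0 : V) :
    d.getD k d0 = f k := by
  apply PySem.Dict.getD_of_mem_items (d := d) (k := k) (v := f k)
  · rw [h]
    exact List.mem_map_of_mem (PySem.List.mem_pyRange_one.mpr ⟨hk1, hk2⟩)
  · rw [tab_keys num d f h]
    exact PySem.List.nodup_pyRange_one 1 (num + 1)

theorem tab_insert {V : Type} (num : Int) (d : PySem.Dict Int V) (f : Int → V)
    (h : d.items = (PySem.List.pyRange 1 (num + 1) 1).map (fun m => (m, f m)))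
    (k : Int) (hk1 : 1 ≤ k) (hk2 : k < num + 1) (v : V) :
    (d.insert k v).items
      = (PySem.List.pyRange 1 (num + 1) 1).map (fun m => (m, if m = k then v else f m)) := by
  have hc : d.contains k = true := by
    rw [PySem.Dict.contains_iff_mem_keys, tab_keys num d f h]
    exact PySem.List.mem_pyRange_one.mpr ⟨hk1, hk2⟩
  rw [PySem.Dict.items_insert_of_contains d v hc, h, List.map_map]
  apply List.map_congr_left
  intro m _
  by_cases hmk : m = k
  · subst hmk; simp
  · simp [hmk]

theorem ofList_tab_items {V : Type} (num : Int) (f : Int → V) :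
    (PySem.Dict.ofList ((PySem.List.pyRange 1 (num + 1) 1).map (fun x => (x, f x)))).items
      = (PySem.List.pyRange 1 (num + 1) 1).map (fun x => (x, f x)) := by
  unfold PySem.Dict.ofList PySem.Dict.update
  have := PySem.Dict.items_foldl_insert_fresh
    (l := (PySem.List.pyRange 1 (num + 1) 1).map (fun x => (x, f x)))
    (k := fun a => a.1) (v := fun a => a.2) (d := PySem.Dict.empty)
    (by intro a _; simp [PySem.Dict.contains_empty])
    (by simp [List.map_map, Function.comp_def]
        exact PySem.List.nodup_pyRange_one 1 (num + 1))
  simpa [List.map_map, Function.comp_def] using this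

theorem factorize_loop_zero (prime num : Int) (po : PySem.Dict Int Int)
    (res : PySem.Dict Int (List (Int × Int))) (i : Int) :
    factorize_loop prime num po res i 0 = (po, res) := rfl

theorem factorize_loop_succ (prime num : Int) (po : PySem.Dict Int Int)
    (res : PySem.Dict Int (List (Int × Int))) (i : Int) (fuel : Nat) :
    factorize_loop prime num po res i (fuel + 1) =
      if prime * i ≤ num then
        factorize_loop prime num
          (po.insert (prime * i) (po.getD i 0 + 1))
          (res.insert (prime * i) (res.getD (prime * i) [] ++ [(prime, po.getD i 0 + 1)]))
          (i + 1) fuel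
      else (po, res) := rfl

theorem tab_end (p num i : Int) (g : Int → List (Int × Int)) (hend : num < p * i) :
    (PySem.List.pyRange 1 (num + 1) 1).map
        (fun m => (m, g m ++ (if p ∣ m ∧ m < p * i then [(p, pexp p m)] else [])))
      = (PySem.List.pyRange 1 (num + 1) 1).map
        (fun m => (m, g m ++ (if p ∣ m then [(p, pexp p m)] else []))) := by
  apply List.map_congr_left
  intro m hm
  obtain ⟨hm1, hm2⟩ := PySem.List.mem_pyRange_one.mp hm
  by_cases hd : p ∣ m
  · rw [if_pos ⟨hd, by omega⟩, if_pos hd]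
  · rw [if_neg (by tauto), if_neg hd]

theorem floop_items (p num : Int) (hp : 2 ≤ p) :
    ∀ (fuel : Nat) (i : Int) (g : Int → List (Int × Int))
      (po : PySem.Dict Int Int) (res : PySem.Dict Int (List (Int × Int))),
      1 ≤ i →
      po.items = (PySem.List.pyRange 1 (num + 1) 1).map
        (fun m => (m, if p ∣ m ∧ m < p * i then pexp p m else 0)) →
      res.items = (PySem.List.pyRange 1 (num + 1) 1).map
        (fun m => (m, g m ++ (if p ∣ m ∧ m < p * i then [(p, pexp p m)] else []))) →
      num < p * (i + fuel) →
      (factorize_loop p num po res i fuel).2.items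
        = (PySem.List.pyRange 1 (num + 1) 1).map
            (fun m => (m, g m ++ (if p ∣ m then [(p, pexp p m)] else []))) := by
  have hp0 : (0:Int) < p := by omega
  intro fuel
  induction fuel with
  | zero =>
    intro i g po res hi hpo hres hfuel
    rw [factorize_loop_zero]
    rw [hres]
    exact tab_end p num i g (by simpa using hfuel)
  | succ fuel ih =>
    intro i g po res hi hpo hres hfuel
    rw [factorize_loop_succ]
    by_cases hc : p * i ≤ num
    · rw [if_pos hc]
      have hi2 : i < p * i := by nlinarith
      have hgetD : po.getD i 0 = pexp p i := by
        rw [tab_getD num po _ hpo i hi (by omega)]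
        by_cases hd : p ∣ i
        · rw [if_pos ⟨hd, hi2⟩]
        · rw [if_neg (by tauto), pexp_of_not_dvd p i hd]
      have hpi1 : (1:Int) ≤ p * i := by nlinarith
      have hpi2 : p * i < num + 1 := by omega
      have hordv : po.getD i 0 + 1 = pexp p (p * i) := by
        rw [hgetD, pexp_mul_self p i hp hi]
      have hresget : res.getD (p * i) [] = g (p * i) := by
        rw [tab_getD num res _ hres (p * i) hpi1 hpi2]
        rw [if_neg (fun h => absurd h.2 (lt_irrefl _))]
        exact List.append_nil _
      have hiff : ∀ m : Int, m ≠ p * i →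
          ((p ∣ m ∧ m < p * i) ↔ (p ∣ m ∧ m < p * (i + 1))) := by
        intro m hmk
        constructor
        · rintro ⟨hd, hlt⟩; exact ⟨hd, by nlinarith⟩
        · rintro ⟨hd, hlt⟩
          obtain ⟨c, rfl⟩ := hd
          refine ⟨⟨c, rfl⟩, ?_⟩
          have hc2 : c < i + 1 := Int.lt_of_mul_lt_mul_left hlt (by omega)
          have hc3 : c ≠ i := fun h => hmk (by rw [h])
          exact mul_lt_mul_of_pos_left (by omega) hp0
      apply ih (i + 1) g _ _ (by omega)
      · rw [tab_insert num po _ hpo (p * i) hpi1 hpi2]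
        apply List.map_congr_left
        intro m _
        by_cases hmk : m = p * i
        · subst hmk
          rw [if_pos rfl, if_pos ⟨dvd_mul_right p i, by nlinarith⟩, hordv]
        · rw [if_neg hmk, if_congr (hiff m hmk) rfl rfl]
      · rw [hresget, tab_insert num res _ hres (p * i) hpi1 hpi2]
        apply List.map_congr_left
        intro m _
        by_cases hmk : m = p * i
        · subst hmk
          rw [if_pos rfl, if_pos ⟨dvd_mul_right p i, by nlinarith⟩, hordv]
        · rw [if_neg hmk, if_congr (hiff m hmk) rfl rfl]
      · have e : p * (i + ((fuel : Int) + 1)) = p * (i + 1 + (fuel : Int)) := by ring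
        push_cast at hfuel
        omega
    · rw [if_neg hc]
      rw [hres]
      exact tab_end p num i g (by omega)

theorem outer_items (num : Int) :
    ∀ (ps : List Int) (res : PySem.Dict Int (List (Int × Int))) (g : Int → List (Int × Int)),
      (∀ p ∈ ps, 2 ≤ p) →
      res.items = (PySem.List.pyRange 1 (num + 1) 1).map (fun m => (m, g m)) →
      (ps.foldl (fun res prime =>
        (factorize_loop prime num
          (PySem.Dict.ofList ((PySem.List.pyRange 1 (num + 1) 1).map (fun x => (x, 0))))
          res 1 num.toNat).2) res).items
        = (PySem.List.pyRange 1 (num + 1) 1).map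
            (fun m => (m, g m ++ ps.flatMap (fun p => if p ∣ m then [(p, pexp p m)] else []))) := by
  intro ps
  induction ps with
  | nil =>
    intro res g _ hres
    rw [List.foldl_nil, hres]
    apply List.map_congr_left
    intro m _
    simp
  | cons p ps ih =>
    intro res g hps hres
    have hp2 : 2 ≤ p := hps p (by simp)
    rw [List.foldl_cons]
    have hpo0 : (PySem.Dict.ofList
        ((PySem.List.pyRange 1 (num + 1) 1).map (fun x => (x, (0 : Int))))).items
        = (PySem.List.pyRange 1 (num + 1) 1).map
            (fun m => (m, if p ∣ m ∧ m < p * 1 then pexp p m else 0)) := by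
      rw [ofList_tab_items num (fun _ => (0 : Int))]
      apply List.map_congr_left
      intro m hm
      obtain ⟨hm1, _⟩ := PySem.List.mem_pyRange_one.mp hm
      rw [mul_one, if_neg]
      rintro ⟨hd, hlt⟩
      have := Int.le_of_dvd (by omega) hd
      omega
    have hres1 : res.items = (PySem.List.pyRange 1 (num + 1) 1).map
        (fun m => (m, g m ++ (if p ∣ m ∧ m < p * 1 then [(p, pexp p m)] else []))) := by
      rw [hres]
      apply List.map_congr_left
      intro m hm
      obtain ⟨hm1, _⟩ := PySem.List.mem_pyRange_one.mp hm
      rw [mul_one, if_neg]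
      · rw [List.append_nil]
      rintro ⟨hd, hlt⟩
      have := Int.le_of_dvd (by omega) hd
      omega
    have hfuel : num < p * (1 + (num.toNat : Int)) := by
      have h1 : num ≤ (num.toNat : Int) := Int.self_le_toNat num
      nlinarith
    have hstep := floop_items p num hp2 num.toNat 1 g _ res (le_refl 1) hpo0 hres1 hfuel
    rw [ih _ (fun m => g m ++ (if p ∣ m then [(p, pexp p m)] else []))
      (fun q hq => hps q (List.mem_cons_of_mem p hq)) hstep]
    apply List.map_congr_left
    intro m _
    simp [List.flatMap_cons, List.append_assoc]

theorem primes_two_le (num : Int) : ∀ p ∈ sieve_of_eratosthenes num, 2 ≤ p := by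
  intro p hp
  unfold sieve_of_eratosthenes at hp
  simp only [List.mem_filter] at hp
  exact (PySem.List.mem_pyRange_one.mp hp.1).1

theorem a_items_eq (num : Int) :
    factorize_up_to num
      = ((sieve_of_eratosthenes num).foldl (fun res prime =>
          (factorize_loop prime num
            (PySem.Dict.ofList ((PySem.List.pyRange 1 (num + 1) 1).map (fun x => (x, (0 : Int)))))
            res 1 num.toNat).2)
          (PySem.Dict.ofList
            ((PySem.List.pyRange 1 (num + 1) 1).map (fun x => (x, ([] : List (Int × Int))))))).items := rfl

theorem alt_items_eq (num : Int) :
    factorize_up_to_alt num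
      = ((PySem.List.pyRange 1 (num + 1) 1).foldl (fun d n =>
          d.insert n ((sieve_of_eratosthenes num).foldl (fun fac p =>
            if PySem.Int.mod n p = 0 then
              fac ++ [(p, (factorize_count_loop p n 0 n.toNat).2)]
            else fac) ([] : List (Int × Int)))) PySem.Dict.empty).items := rfl

-- ===== VERDICT (by name: the statement is the Claim_ definition above) =====
theorem factorize_up_to_spec : Claim_equal_factorize_up_to := by
  intro num _
  unfold Spec_factorize_up_to
  rw [a_items_eq num,
    outer_items num _ _ (fun _ => []) (primes_two_le num)
      (ofList_tab_items num (fun _ => ([] : List (Int × Int)))),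
    alt_items_eq num]
  have hB := PySem.Dict.items_foldl_insert_fresh
    (l := PySem.List.pyRange 1 (num + 1) 1)
    (k := fun n => n)
    (v := fun n => (sieve_of_eratosthenes num).foldl (fun fac p =>
      if PySem.Int.mod n p = 0 then
        fac ++ [(p, (factorize_count_loop p n 0 n.toNat).2)]
      else fac) ([] : List (Int × Int)))
    (d := PySem.Dict.empty)
    (fun a _ => PySem.Dict.contains_empty a)
    (by simpa using PySem.List.nodup_pyRange_one 1 (num + 1))
  rw [hB]
  have hempty : (PySem.Dict.empty : PySem.Dict Int (List (Int × Int))).items = [] := rfl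
  rw [hempty, List.nil_append]
  apply List.map_congr_left
  intro n hn
  obtain ⟨hn1, _⟩ := PySem.List.mem_pyRange_one.mp hn
  have hcong : ∀ (acc : List (Int × Int)) (q : Int), q ∈ sieve_of_eratosthenes num →
      (if PySem.Int.mod n q = 0 then
        acc ++ [(q, (factorize_count_loop q n 0 n.toNat).2)]
      else acc)
      = acc ++ (if q ∣ n then [(q, pexp q n)] else []) := by
    intro acc q hq
    have hq2 := primes_two_le num q hq
    by_cases hd : q ∣ n
    · rw [if_pos ((PySem.Int.mod_eq_zero_iff_dvd n q).mpr hd), if_pos hd,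
        count_loop_snd q hq2 n.toNat n 0 hn1 (le_refl _), zero_add]
    · rw [if_neg (fun h => hd ((PySem.Int.mod_eq_zero_iff_dvd n q).mp h)), if_neg hd,
        List.append_nil]
  have hfold : (sieve_of_eratosthenes num).foldl (fun fac p =>
      if PySem.Int.mod n p = 0 then
        fac ++ [(p, (factorize_count_loop p n 0 n.toNat).2)]
      else fac) ([] : List (Int × Int))
      = [] ++ (sieve_of_eratosthenes num).flatMap
          (fun q => if q ∣ n then [(q, pexp q n)] else []) := by
    rw [PySem.List.foldl_congr_mem _ _ _ _ hcong, PySem.List.foldl_append_eq_flatMap]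
  exact congrArg (Prod.mk n) hfold.symm
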